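-- pv_equiv track=rewrite | github.com/jinddings/CodingTest | 프로그래머스/lv1/86051. 없는 숫자 더하기/없는 숫자 더하기.py | solution
-- ===== SOURCE A (Python) =====
-- def solution(numbers):
--     answer = 0
--
--     for i in range(10):
--         try :
--             numbers.index(i)
--         except ValueError:
--             answer += i
--
--     return answer
-- ===== SOURCE B (Python) =====
-- def solution(numbers):
--     answer, seen = 45, 0
--     for n in numbers:
--         if 0 <= n <= 9 and not (seen >> n) & 1:
--             answer -= n
--             seen |= 1 << n
--     return answer
-- ===== Notes on version B (the rewrite author's own statement) =====
-- stated objective: faster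
-- what changed: Instead of scanning the list once per digit (10 .index scans with try/except), B makes a single pass over the input, keeping a seen-bitmask of digits already encountered and subtracting each new digit from 45.
import Mathlib
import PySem

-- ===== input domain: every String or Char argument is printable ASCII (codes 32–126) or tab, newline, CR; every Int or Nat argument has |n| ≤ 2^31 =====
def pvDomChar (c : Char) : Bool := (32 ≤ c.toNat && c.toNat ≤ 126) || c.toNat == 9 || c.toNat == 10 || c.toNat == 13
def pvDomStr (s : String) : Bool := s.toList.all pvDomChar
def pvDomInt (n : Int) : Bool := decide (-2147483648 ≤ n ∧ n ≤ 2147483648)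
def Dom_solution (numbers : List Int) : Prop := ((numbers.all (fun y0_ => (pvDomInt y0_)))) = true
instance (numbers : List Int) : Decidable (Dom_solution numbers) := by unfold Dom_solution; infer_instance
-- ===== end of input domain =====

-- B replaces A's per-digit .index scan (10 membership scans with try/except) by a single
-- pass over the input with a seen-bitmask of digits, subtracting each new digit from 45.

-- ===== PORT A =====
def solution (numbers : List Int) : Int :=
  (PySem.List.pyRange 0 10 1).foldl
    (fun answer i =>
      match PySem.List.index? numbers i with
      | some _ => answer            -- numbers.index(i) succeeds, nothing added
      | none => answer + i)         -- ValueError branch: answer += i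
    0

-- ===== PORT B =====
-- seen is a Python int that stays a nonnegative bitmask; ported as Nat, with
-- '(seen >> n) & 1' = testBit and 'seen |= 1 << n' = '||| (1 <<< n)' — exact since the
-- guard 0 ≤ n ≤ 9 holds whenever seen is updated or shifted by n.
def solution_alt (numbers : List Int) : Int :=
  (numbers.foldl
    (fun (st : Int × Nat) (n : Int) =>
      if 0 ≤ n ∧ n ≤ 9 ∧ st.2.testBit n.toNat = false
      then (st.1 - n, st.2 ||| (1 <<< n.toNat))
      else st)
    ((45 : Int), (0 : Nat))).1

-- ===== PRECONDITION & SPEC =====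
def Spec_solution (numbers : List Int) (out : Int) : Prop := out = solution_alt numbers
instance (numbers : List Int) (out : Int) : Decidable (Spec_solution numbers out) := by unfold Spec_solution; infer_instance

-- ===== CLAIM (what is proved, stated in full; the proofs are below) =====
def Claim_equal_solution : Prop := ∀ (numbers : List Int), Dom_solution numbers → Spec_solution numbers (solution numbers)

-- ===== LEMMAS AND PROOFS =====

-- A's loop accumulates exactly the sum of the non-members of 0..9.
theorem foldA_eq (numbers l : List Int) (a : Int) :
    l.foldl
      (fun answer i =>
        match PySem.List.index? numbers i with
        | some _ => answer
        | none => answer + i) a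
      = a + (l.filter (fun i => decide (i ∉ numbers))).sum := by
  induction l generalizing a with
  | nil => simp
  | cons x xs ih =>
    rw [List.foldl_cons]
    by_cases hx : x ∈ numbers
    · obtain ⟨k, hk⟩ := Option.isSome_iff_exists.mp
        ((PySem.List.index?_isSome_iff numbers x).mpr hx)
      rw [hk, ih]
      simp [hx]
    · rw [(PySem.List.index?_eq_none_iff numbers x).mpr hx, ih]
      simp [hx]
      ring

-- The remaining-after-subtraction sum F: digits 0..9 that occur in xs and are not yet marked in s.
def remSum (xs : List Int) (s : Nat) : Int :=
  ∑ i ∈ Finset.range 10, (if (i : Int) ∈ xs ∧ s.testBit i = false then (i : Int) else 0)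

theorem foldB_eq (xs : List Int) (a : Int) (s : Nat) :
    (xs.foldl
      (fun (st : Int × Nat) (n : Int) =>
        if 0 ≤ n ∧ n ≤ 9 ∧ st.2.testBit n.toNat = false
        then (st.1 - n, st.2 ||| (1 <<< n.toNat))
        else st)
      (a, s)).1 = a - remSum xs s := by
  induction xs generalizing a s with
  | nil => simp [remSum]
  | cons x xs ih =>
    rw [List.foldl_cons]
    by_cases hg : 0 ≤ x ∧ x ≤ 9 ∧ s.testBit x.toNat = false
    · rw [if_pos hg, ih]
      have hx9 : x.toNat < 10 := by omega
      have hrem : remSum (x :: xs) s = x + remSum xs (s ||| (1 <<< x.toNat)) := by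
        unfold remSum
        have hsplit : ∀ i ∈ Finset.range 10,
            (if (i : Int) ∈ x :: xs ∧ s.testBit i = false then (i : Int) else 0)
            - (if (i : Int) ∈ xs ∧ (s ||| (1 <<< x.toNat)).testBit i = false then (i : Int) else 0)
            = (if i = x.toNat then x else 0) := by
          intro i hi
          simp only [Finset.mem_range] at hi
          have htb : (s ||| (1 <<< x.toNat)).testBit i
              = (s.testBit i || decide (i = x.toNat)) := by
            rw [Nat.testBit_or]
            have hpow : (1 <<< x.toNat) = 2 ^ x.toNat := by simp [Nat.shiftLeft_eq]
            rw [hpow, Nat.testBit_two_pow]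
            simp [eq_comm]
          by_cases hix : i = x.toNat
          · subst hix
            have hxi : (x.toNat : Int) = x := by omega
            simp [htb, hxi, hg.2.2]
          · have hxi : (i : Int) ≠ x := by omega
            simp only [htb, hix, decide_false, Bool.or_false, List.mem_cons]
            by_cases hm : (i : Int) ∈ xs <;> simp [hm, hxi]
        have := Finset.sum_congr rfl hsplit
        rw [Finset.sum_sub_distrib] at this
        rw [Finset.sum_ite_eq' (Finset.range 10) x.toNat (fun _ => x)] at this
        simp only [Finset.mem_range, hx9, if_pos] at this
        omega
      rw [hrem]; ring
    · rw [if_neg hg, ih]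
      have hrem : remSum (x :: xs) s = remSum xs s := by
        unfold remSum
        refine Finset.sum_congr rfl ?_
        intro i hi
        simp only [Finset.mem_range] at hi
        by_cases hix : (i : Int) = x
        · have : ¬ s.testBit i = false := by
            intro hb
            exact hg ⟨by omega, by omega, by
              have : x.toNat = i := by omega
              rw [this]; exact hb⟩
          simp [this]
        · simp [hix]
      rw [hrem]

-- Splitting a sum by membership.
theorem filter_split (numbers l : List Int) :
    (l.filter (fun i => decide (i ∉ numbers))).sum
      + (l.filter (fun i => decide (i ∈ numbers))).sum = l.sum := by
  induction l with
  | nil => simp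
  | cons x xs ih =>
    simp only [List.filter_cons, List.sum_cons]
    simp at ih ⊢
    by_cases hx : x ∈ numbers <;> simp [hx] <;> omega

-- A list-filter sum as a fold of if-terms (used to expand the literal 0..9 list).
theorem filtsum (p : Int → Bool) (l : List Int) :
    (l.filter p).sum = l.foldr (fun x acc => (if p x then x else 0) + acc) 0 := by
  induction l with
  | nil => rfl
  | cons x xs ih => simp only [List.filter_cons, List.foldr_cons, ← ih]; split <;> simp

-- remSum at an empty mask is the sum of the present digits of 0..9.
theorem present_eq (numbers : List Int) :
    remSum numbers 0
      = (([0,1,2,3,4,5,6,7,8,9] : List Int).filter (fun i => decide (i ∈ numbers))).sum := by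
  rw [filtsum]
  unfold remSum
  simp only [Nat.zero_testBit, and_true, Finset.sum_range_succ, Finset.sum_range_zero,
    List.foldr_cons, List.foldr_nil, decide_eq_true_eq]
  push_cast
  ring

-- ===== VERDICT (by name: the statement is the Claim_ definition above) =====
theorem solution_spec : Claim_equal_solution := by
  intro numbers _
  show solution numbers = solution_alt numbers
  unfold solution solution_alt
  rw [foldA_eq, foldB_eq]
  have hR : PySem.List.pyRange 0 10 1 = [0,1,2,3,4,5,6,7,8,9] := by decide
  rw [hR]
  have h1 := filter_split numbers ([0,1,2,3,4,5,6,7,8,9] : List Int)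
  have h2 := present_eq numbers
  simp only [List.sum_cons, List.sum_nil] at h1
  omega
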